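-- pv_equiv track=rewrite | github.com/mi-shraban/cf_solves | 1829E.py | largestLake
-- ===== SOURCE A (Python) =====
-- from collections import deque
--
-- xy = [(1, 0), (0, 1), (-1, 0), (0, -1)]
--
-- def flood_fill(n, m, grid, r, c):
--     room = 0
--     if r < 0 or r >= n or c < 0 or c >= m:
--         return 0
--     if grid[r][c] == 0 or grid[r][c] == 'V':
--         return 0
--
--     queue = deque([(r, c)])
--     while queue:
--         r, c = queue.popleft()
--         if grid[r][c] == 0 or grid[r][c] == 'V':
--             continue
--
--         room += grid[r][c]
--         grid[r][c] = 'V'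
--
--         for x, y in xy:
--             n_r, n_c = r + x, c + y
--             if 0 <= n_r < n and 0 <= n_c < m:
--                 queue.append((n_r, n_c))
--
--     return room
--
-- def largestLake(n, m, grid):
--     largest_lake = 0
--     for i in range(n):
--         for j in range(m):
--             if grid[i][j] != 0:
--                 lake = flood_fill(n, m, grid, i, j)
--                 if largest_lake < lake:
--                     largest_lake = lake
--     return largest_lake
-- ===== SOURCE B (Python) =====
-- # Level-synchronous flood fill: each round sums and marks the whole frontier at once,
-- # then builds a deduplicated next frontier (dict keeps insertion order, O(1) membership).
-- # Mutates grid exactly like A (component cells become 'V').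
-- def lake_sum(n, m, grid, r, c):
--     if grid[r][c] == 0 or grid[r][c] == 'V':
--         return 0
--     total = 0
--     frontier = [(r, c)]
--     while frontier:
--         total += sum(grid[a][b] for a, b in frontier)
--         for a, b in frontier:
--             grid[a][b] = 'V'
--         nxt = {}
--         for a, b in frontier:
--             for aa, bb in ((a + 1, b), (a, b + 1), (a - 1, b), (a, b - 1)):
--                 if 0 <= aa < n and 0 <= bb < m and grid[aa][bb] != 0 and grid[aa][bb] != 'V':
--                     nxt[(aa, bb)] = None
--         frontier = list(nxt)
--     return total
--
-- def largestLake(n, m, grid):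
--     best = 0
--     for i in range(n):
--         for j in range(m):
--             if grid[i][j] != 0:
--                 s = lake_sum(n, m, grid, i, j)
--                 if best < s:
--                     best = s
--     return best
-- ===== Notes on version B (the rewrite author's own statement) =====
-- stated objective: alternative
-- what changed: flood_fill's per-cell deque BFS is replaced by a level-synchronous frontier traversal: each round sums and marks the entire frontier at once and builds a deduplicated next frontier as dict keys, so no queue of (possibly duplicated) single cells is ever maintained
import Mathlib
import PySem

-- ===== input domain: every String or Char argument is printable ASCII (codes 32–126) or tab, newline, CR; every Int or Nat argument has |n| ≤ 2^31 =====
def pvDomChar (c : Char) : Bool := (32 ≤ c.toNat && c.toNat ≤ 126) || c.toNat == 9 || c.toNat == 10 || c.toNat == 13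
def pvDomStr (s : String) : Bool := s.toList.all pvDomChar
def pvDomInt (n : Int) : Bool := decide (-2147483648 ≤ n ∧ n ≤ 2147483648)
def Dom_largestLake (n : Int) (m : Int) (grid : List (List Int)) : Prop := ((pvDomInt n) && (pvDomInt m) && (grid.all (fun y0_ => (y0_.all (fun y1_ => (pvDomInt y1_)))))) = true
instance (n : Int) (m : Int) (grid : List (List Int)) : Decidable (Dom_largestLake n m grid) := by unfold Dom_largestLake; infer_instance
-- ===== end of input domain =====

-- B replaces A's per-cell deque BFS flood fill by a level-synchronous frontier traversal
-- (objective: alternative).  Both Pythons mutate `grid` identically (component cells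
-- become 'V'); the equivalence proved here is about the return value.
-- Grid cells are modelled as Option Int: `some v` = the int v, `none` = the mark 'V'.

-- ===== PORT A =====
-- shared grid-representation helpers (Python's grid[r][c] read / 'V' write)
def pvIsActive : Option Int → Bool              -- negation of Python's "== 0 or == 'V'"
  | none => false
  | some v => v != 0

def pvCellAt (g : List (List (Option Int))) (r c : Int) : Option Int :=
  if 0 ≤ r ∧ 0 ≤ c then (g.getD r.toNat []).getD c.toNat none else none

def pvCellVal (g : List (List (Option Int))) (r c : Int) : Int := (pvCellAt g r c).getD 0

def pvMark (g : List (List (Option Int))) (r c : Int) : List (List (Option Int)) :=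
  if 0 ≤ r ∧ 0 ≤ c then g.set r.toNat ((g.getD r.toNat []).set c.toNat none) else g

def pvActive (g : List (List (Option Int))) : Nat :=
  (g.map (fun row => row.countP pvIsActive)).sum

-- A's in-bounds neighbour list, in the order of the module constant xy
def pvNbrs (n m r c : Int) : List (Int × Int) :=
  [(r+1,c),(r,c+1),(r-1,c),(r,c-1)].filter (fun p => 0 ≤ p.1 ∧ p.1 < n ∧ 0 ≤ p.2 ∧ p.2 < m)

-- the while-queue loop of A's flood_fill
def bfsA (n m : Int) (g : List (List (Option Int))) (q : List (Int × Int)) :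
    Int × List (List (Option Int)) :=
  match q with
  | [] => (0, g)
  | (r, c) :: rest =>
    if h : pvIsActive (pvCellAt g r c) = true then
      let out := bfsA n m (pvMark g r c) (rest ++ pvNbrs n m r c)
      (pvCellVal g r c + out.1, out.2)
    else
      bfsA n m g rest
termination_by q.length + 4 * pvActive g
decreasing_by
  · -- marking the popped active cell strictly shrinks the active count (proved inline
    -- so that no lemma precedes the claim block)
    have hcnt : ∀ (l : List (Option Int)) (i : Nat) (hi : i < l.length),
        pvIsActive l[i] = true → (l.set i none).countP pvIsActive < l.countP pvIsActive := by
      intro l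
      induction l with
      | nil => intro i hi; simp at hi
      | cons a t ih =>
        intro i hi hp
        cases i with
        | zero => simp_all [List.countP_cons, pvIsActive]
        | succ i =>
          simp only [List.set_cons_succ, List.countP_cons]
          have := ih i (by simpa using hi) (by simpa using hp)
          omega
    have hsum : ∀ (l : List Nat) (i : Nat) (hi : i < l.length),
        ∀ a : Nat, a < l[i] → (l.set i a).sum < l.sum := by
      intro l
      induction l with
      | nil => intro i hi; simp at hi
      | cons x t ih =>
        intro i hi a ha
        cases i with
        | zero => simp_all
        | succ i =>
          simp only [List.set_cons_succ, List.sum_cons]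
          have := ih i (by simpa using hi) a (by simpa using ha)
          omega
    have hb : 0 ≤ r ∧ 0 ≤ c ∧ r.toNat < g.length ∧ c.toNat < (g.getD r.toNat []).length := by
      have h' := h
      unfold pvCellAt at h'
      split at h'
      · rename_i hg
        refine ⟨hg.1, hg.2, ?_, ?_⟩
        · by_contra hlen
          have he : g.getD r.toNat [] = [] := List.getD_eq_default _ _ (by omega)
          rw [he] at h'
          simp [pvIsActive] at h'
        · by_contra hlen
          have he : (g.getD r.toNat []).getD c.toNat none = none :=
            List.getD_eq_default _ _ (by omega)
          rw [he] at h'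
          simp [pvIsActive] at h'
      · simp [pvIsActive] at h'
    have hlt : pvActive (pvMark g r c) < pvActive g := by
      obtain ⟨hr, hc, hi, hj⟩ := hb
      have hcell : pvCellAt g r c = (g.getD r.toNat []).getD c.toNat none := by
        unfold pvCellAt
        rw [if_pos ⟨hr, hc⟩]
      have hrow : g.getD r.toNat [] = g[r.toNat] := List.getD_eq_getElem g [] hi
      have hltc : ((g.getD r.toNat []).set c.toNat none).countP pvIsActive
          < (List.map (fun row => row.countP pvIsActive) g)[r.toNat]'(by simpa using hi) := by
        rw [List.getElem_map, ← hrow]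
        refine hcnt _ _ hj ?_
        rw [← List.getD_eq_getElem _ none hj, ← hcell]
        exact h
      unfold pvMark pvActive
      rw [if_pos ⟨hr, hc⟩, List.map_set]
      exact hsum (List.map (fun row => row.countP pvIsActive) g) r.toNat
        (by simpa using hi) (((g.getD r.toNat []).set c.toNat none).countP pvIsActive) hltc
    have h4 : (pvNbrs n m r c).length ≤ 4 :=
      le_trans (List.length_filter_le _ _) (by simp)
    simp [List.length_append]
    omega
  · simp only [List.length_cons]
    omega

def floodA (n m : Int) (g : List (List (Option Int))) (r c : Int) :
    Int × List (List (Option Int)) :=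
  if r < 0 ∨ n ≤ r ∨ c < 0 ∨ m ≤ c then (0, g)
  else if pvCellAt g r c = some 0 ∨ pvCellAt g r c = none then (0, g)
  else bfsA n m g [(r, c)]

def largestLake (n : Int) (m : Int) (grid : List (List Int)) : Int :=
  ((PySem.List.pyRange 0 n 1).foldl (fun st i =>
    (PySem.List.pyRange 0 m 1).foldl (fun (st : Int × List (List (Option Int))) j =>
      if pvCellAt st.2 i j ≠ some 0 then
        let fo := floodA n m st.2 i j
        ((if st.1 < fo.1 then fo.1 else st.1), fo.2)
      else st) st)
    ((0 : Int), grid.map (fun row => row.map some))).1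

-- ===== PORT B =====
-- next frontier: dict-keyed dedup in insertion order (Source B's nxt dict)
def pvBuildNext (n m : Int) (g : List (List (Option Int))) (F : List (Int × Int)) :
    List (Int × Int) :=
  F.foldl (fun acc p =>
    [(p.1+1,p.2),(p.1,p.2+1),(p.1-1,p.2),(p.1,p.2-1)].foldl (fun acc q =>
      if 0 ≤ q.1 ∧ q.1 < n ∧ 0 ≤ q.2 ∧ q.2 < m ∧ pvIsActive (pvCellAt g q.1 q.2) = true ∧ q ∉ acc
      then acc ++ [q] else acc) acc) []

def pvMarkAll (g : List (List (Option Int))) (F : List (Int × Int)) :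
    List (List (Option Int)) :=
  F.foldl (fun g p => pvMark g p.1 p.2) g

def pvSumVals (g : List (List (Option Int))) (F : List (Int × Int)) : Int :=
  (F.map (fun p => pvCellVal g p.1 p.2)).sum

-- Source B's while-frontier loop (fuel only makes the recursion total; pvActive g + 1 rounds always suffice)
def levelsB (n m : Int) (fuel : Nat) (g : List (List (Option Int))) (F : List (Int × Int)) :
    Int × List (List (Option Int)) :=
  match fuel, F with
  | 0, _ => (0, g)
  | _ + 1, [] => (0, g)
  | fuel + 1, p :: F =>
    let s := pvSumVals g (p :: F)
    let g1 := pvMarkAll g (p :: F)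
    let F1 := pvBuildNext n m g1 (p :: F)
    let out := levelsB n m fuel g1 F1
    (s + out.1, out.2)

def lakeB (n m : Int) (g : List (List (Option Int))) (r c : Int) :
    Int × List (List (Option Int)) :=
  if pvCellAt g r c = some 0 ∨ pvCellAt g r c = none then (0, g)
  else levelsB n m (pvActive g + 1) g [(r, c)]

def largestLake_alt (n : Int) (m : Int) (grid : List (List Int)) : Int :=
  ((PySem.List.pyRange 0 n 1).foldl (fun st i =>
    (PySem.List.pyRange 0 m 1).foldl (fun (st : Int × List (List (Option Int))) j =>
      if pvCellAt st.2 i j ≠ some 0 then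
        let fo := lakeB n m st.2 i j
        (max st.1 fo.1, fo.2)
      else st) st)
    ((0 : Int), grid.map (fun row => row.map some))).1

-- ===== PRECONDITION & SPEC =====
-- Pre_ excludes exactly the inputs on which Python A raises IndexError: when both n and m
-- are positive the double loop reads grid[i][j] for all i<n, j<m, so the grid must have
-- at least n rows whose first n rows each have at least m entries.
def Pre_largestLake (n : Int) (m : Int) (grid : List (List Int)) : Prop :=
  0 < n → 0 < m → (n ≤ (grid.length : Int) ∧ ∀ row ∈ grid.take n.toNat, m ≤ (row.length : Int))
instance (n : Int) (m : Int) (grid : List (List Int)) : Decidable (Pre_largestLake n m grid) := by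
  unfold Pre_largestLake; infer_instance

def pvWitness_largestLake : Int × Int × List (List Int) := (2, 2, [[1, 2], [0, 3]])

def Spec_largestLake (n : Int) (m : Int) (grid : List (List Int)) (out : Int) : Prop := out = largestLake_alt n m grid
instance (n : Int) (m : Int) (grid : List (List Int)) (out : Int) : Decidable (Spec_largestLake n m grid out) := by unfold Spec_largestLake; infer_instance

-- ===== CLAIM (what is proved, stated in full; the proofs are below) =====
def Claim_equal_largestLake : Prop := ∀ (n : Int) (m : Int) (grid : List (List Int)), Dom_largestLake n m grid → Pre_largestLake n m grid → Spec_largestLake n m grid (largestLake n m grid)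


-- ===== LEMMAS AND PROOFS =====

-- counting lemmas for pvActive
theorem pvCountP_set_le {α : Type} (p : α → Bool) (v : α) (hv : p v = false) :
    ∀ (l : List α) (i : Nat), (l.set i v).countP p ≤ l.countP p := by
  intro l
  induction l with
  | nil => intro i; simp
  | cons a t ih =>
    intro i
    cases i with
    | zero => simp [List.countP_cons, hv]
    | succ i => simp only [List.set_cons_succ, List.countP_cons]; have := ih i; omega

theorem pvCountP_set_lt {α : Type} (p : α → Bool) (v : α) (hv : p v = false) :
    ∀ (l : List α) (i : Nat) (hi : i < l.length), p l[i] = true → (l.set i v).countP p < l.countP p := by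
  intro l
  induction l with
  | nil => intro i hi; simp at hi
  | cons a t ih =>
    intro i hi hp
    cases i with
    | zero => simp_all [List.countP_cons, hv]
    | succ i =>
      simp only [List.set_cons_succ, List.countP_cons]
      have := ih i (by simpa using hi) (by simpa using hp)
      omega

theorem pvSum_set_le : ∀ (l : List Nat) (i : Nat) (a : Nat), a ≤ l.getD i 0 → (l.set i a).sum ≤ l.sum := by
  intro l
  induction l with
  | nil => intro i a _; simp
  | cons x t ih =>
    intro i a ha
    cases i with
    | zero => simp_all
    | succ i => simp only [List.set_cons_succ, List.sum_cons]; have := ih i a (by simpa using ha); omega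

theorem pvSum_set_lt : ∀ (l : List Nat) (i : Nat) (hi : i < l.length) (a : Nat), a < l[i] → (l.set i a).sum < l.sum := by
  intro l
  induction l with
  | nil => intro i hi; simp at hi
  | cons x t ih =>
    intro i hi a ha
    cases i with
    | zero => simp_all
    | succ i =>
      simp only [List.set_cons_succ, List.sum_cons]
      have := ih i (by simpa using hi) a (by simpa using ha)
      omega

theorem pvActive_bounds (g : List (List (Option Int))) (r c : Int)
    (h : pvIsActive (pvCellAt g r c) = true) :
    0 ≤ r ∧ 0 ≤ c ∧ r.toNat < g.length ∧ c.toNat < (g.getD r.toNat []).length := by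
  unfold pvCellAt at h
  split at h
  · rename_i hg
    refine ⟨hg.1, hg.2, ?_, ?_⟩
    · by_contra hlen
      have he : g.getD r.toNat [] = [] := List.getD_eq_default _ _ (by omega)
      rw [he] at h
      simp [pvIsActive] at h
    · by_contra hlen
      have he : (g.getD r.toNat []).getD c.toNat none = none :=
        List.getD_eq_default _ _ (by omega)
      rw [he] at h
      simp [pvIsActive] at h
  · simp [pvIsActive] at h

theorem pvActive_mark_lt (g : List (List (Option Int))) (r c : Int)
    (h : pvIsActive (pvCellAt g r c) = true) : pvActive (pvMark g r c) < pvActive g := by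
  obtain ⟨hr, hc, hi, hj⟩ := pvActive_bounds g r c h
  have hcell : pvCellAt g r c = (g.getD r.toNat []).getD c.toNat none := by
    unfold pvCellAt; rw [if_pos ⟨hr, hc⟩]
  have hrow : g.getD r.toNat [] = g[r.toNat] := List.getD_eq_getElem g [] hi
  have hlt : ((g.getD r.toNat []).set c.toNat none).countP pvIsActive
      < (List.map (fun row => row.countP pvIsActive) g)[r.toNat]'(by simpa using hi) := by
    rw [List.getElem_map, ← hrow]
    exact pvCountP_set_lt pvIsActive none rfl _ _ hj
      (by rw [← List.getD_eq_getElem _ none hj, ← hcell]; exact h)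
  unfold pvMark pvActive
  rw [if_pos ⟨hr, hc⟩, List.map_set]
  exact pvSum_set_lt _ _ (by simpa using hi) _ hlt


-- basic getD/set facts
theorem pvGetD_set_self {α : Type} (l : List α) (i : Nat) (x : α) (d : α) (h : i < l.length) :
    (l.set i x).getD i d = x := by
  rw [List.getD_eq_getElem _ _ (by simpa using h)]
  simp [List.getElem_set_self]

theorem pvGetD_set_ne {α : Type} (l : List α) {i j : Nat} (x : α) (d : α) (h : i ≠ j) :
    (l.set i x).getD j d = l.getD j d := by
  by_cases hj : j < l.length
  · rw [List.getD_eq_getElem _ _ (by simpa using hj), List.getD_eq_getElem _ _ hj]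
    exact List.getElem_set_ne h _
  · rw [List.getD_eq_default _ _ (by simp; omega), List.getD_eq_default _ _ (by omega)]

theorem pvIsActive_false_iff (x : Option Int) :
    pvIsActive x = false ↔ (x = some 0 ∨ x = none) := by
  cases x with
  | none => simp [pvIsActive]
  | some v => simp [pvIsActive]

-- marking facts
theorem pvCellAt_mark_ne (g : List (List (Option Int))) {r c r' c' : Int}
    (hne : ((r', c') : Int × Int) ≠ (r, c)) :
    pvCellAt (pvMark g r c) r' c' = pvCellAt g r' c' := by
  have hne' : r' ≠ r ∨ c' ≠ c := by
    rcases eq_or_ne r' r with h1 | h1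
    · rcases eq_or_ne c' c with h2 | h2
      · exact absurd (by rw [h1, h2]) hne
      · exact Or.inr h2
    · exact Or.inl h1
  unfold pvMark
  split
  · rename_i hg
    unfold pvCellAt
    split
    · rename_i hg'
      by_cases hij : r'.toNat = r.toNat
      · have hr' : r' = r := by omega
        have hjj : c'.toNat ≠ c.toNat := by
          rcases hne' with h | h
          · exact absurd hr' h
          · omega
        rw [hij]
        by_cases hlen : r.toNat < g.length
        · rw [pvGetD_set_self _ _ _ _ hlen]
          exact pvGetD_set_ne _ _ _ (Ne.symm hjj)
        · have h1 : (g.set r.toNat ((g.getD r.toNat []).set c.toNat none)).getD r.toNat [] = [] :=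
            List.getD_eq_default _ _ (by simp; omega)
          have h2 : g.getD r.toNat [] = [] := List.getD_eq_default _ _ (by omega)
          rw [h1, h2]
      · rw [pvGetD_set_ne _ _ _ (fun he => hij he.symm)]
    · rfl
  · rfl

theorem pvCellAt_mark_self (g : List (List (Option Int))) (r c : Int) :
    pvCellAt (pvMark g r c) r c = none := by
  unfold pvMark pvCellAt
  split
  · rename_i hg
    by_cases hlen : r.toNat < g.length
    · rw [pvGetD_set_self _ _ _ _ hlen]
      by_cases hj : c.toNat < (g.getD r.toNat []).length
      · rw [List.getD_eq_getElem _ _ (by simpa using hj)]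
        simp [List.getElem_set_self]
      · exact List.getD_eq_default _ _ (by rw [List.length_set]; omega)
    · have h1 : (g.set r.toNat ((g.getD r.toNat []).set c.toNat none)).getD r.toNat [] = [] :=
        List.getD_eq_default _ _ (by rw [List.length_set]; omega)
      rw [h1]; rfl
  · rfl

theorem pvActive_of_mark (g : List (List (Option Int))) (a b r c : Int)
    (h : pvIsActive (pvCellAt (pvMark g a b) r c) = true) :
    pvIsActive (pvCellAt g r c) = true := by
  by_cases he : ((r, c) : Int × Int) = (a, b)
  · have h1 : r = a := congrArg Prod.fst he
    have h2 : c = b := congrArg Prod.snd he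
    rw [h1, h2, pvCellAt_mark_self] at h
    simp [pvIsActive] at h
  · rwa [pvCellAt_mark_ne g he] at h

theorem pvMark_comm (g : List (List (Option Int))) {r c r' c' : Int}
    (h : pvIsActive (pvCellAt g r c) = true) (h' : pvIsActive (pvCellAt g r' c') = true)
    (hne : ((r, c) : Int × Int) ≠ (r', c')) :
    pvMark (pvMark g r c) r' c' = pvMark (pvMark g r' c') r c := by
  obtain ⟨hr, hc, hi, hj⟩ := pvActive_bounds g r c h
  obtain ⟨hr', hc', hi', hj'⟩ := pvActive_bounds g r' c' h'
  unfold pvMark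
  simp only [if_pos (And.intro hr hc), if_pos (And.intro hr' hc')]
  by_cases hij : r.toNat = r'.toNat
  · have hrr : r = r' := by omega
    have hcc : c ≠ c' := fun he => hne (by rw [hrr, he])
    have hjj : c.toNat ≠ c'.toNat := by omega
    rw [← hij]
    rw [pvGetD_set_self _ _ _ _ hi, pvGetD_set_self _ _ _ _ hi]
    rw [List.set_set, List.set_set]
    rw [List.set_comm _ _ hjj]
  · rw [pvGetD_set_ne _ _ _ hij, pvGetD_set_ne _ _ _ (Ne.symm hij)]
    exact List.set_comm _ _ hij

theorem pvCellVal_mark_ne (g : List (List (Option Int))) {r c r' c' : Int}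
    (hne : ((r', c') : Int × Int) ≠ (r, c)) :
    pvCellVal (pvMark g r c) r' c' = pvCellVal g r' c' := by
  unfold pvCellVal
  rw [pvCellAt_mark_ne g hne]

theorem pvActive_mark_le (g : List (List (Option Int))) (r c : Int) :
    pvActive (pvMark g r c) ≤ pvActive g := by
  unfold pvMark
  split
  · unfold pvActive
    rw [List.map_set]
    apply pvSum_set_le
    by_cases hi : r.toNat < g.length
    · rw [List.getD_eq_getElem g [] hi]
      have h2 : (List.map (fun row => row.countP pvIsActive) g).getD r.toNat 0
          = (g[r.toNat]).countP pvIsActive := by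
        rw [List.getD_eq_getElem _ _ (by simpa using hi), List.getElem_map]
      rw [h2]
      exact pvCountP_set_le pvIsActive none rfl _ _
    · have h1 : g.getD r.toNat [] = [] := List.getD_eq_default _ _ (by omega)
      rw [h1]
      simp
  · exact le_rfl

-- one-step equations for the BFS loop
theorem bfsA_nil (n m : Int) (g : List (List (Option Int))) : bfsA n m g [] = (0, g) := by
  simp [bfsA]

theorem bfsA_cons_active (n m : Int) {g : List (List (Option Int))} {r c : Int}
    (h : pvIsActive (pvCellAt g r c) = true) (rest : List (Int × Int)) :
    bfsA n m g ((r, c) :: rest) =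
      (pvCellVal g r c + (bfsA n m (pvMark g r c) (rest ++ pvNbrs n m r c)).1,
        (bfsA n m (pvMark g r c) (rest ++ pvNbrs n m r c)).2) := by
  simp [bfsA, h]

theorem bfsA_cons_inactive (n m : Int) {g : List (List (Option Int))} {r c : Int}
    (h : pvIsActive (pvCellAt g r c) = false) (rest : List (Int × Int)) :
    bfsA n m g ((r, c) :: rest) = bfsA n m g rest := by
  simp [bfsA, h]

-- bfs only deactivates cells
theorem bfs_shrink (n m : Int) : ∀ (g : List (List (Option Int))) (q : List (Int × Int)) (a b : Int),
    pvIsActive (pvCellAt (bfsA n m g q).2 a b) = true → pvIsActive (pvCellAt g a b) = true := by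
  intro g q
  fun_induction bfsA n m g q with
  | case1 => intro a b h; exact h
  | case2 g r c rest hx out ih =>
    intro a b h
    exact pvActive_of_mark g r c a b (ih a b h)
  | case3 g r c rest hx ih =>
    intro a b h
    exact ih a b h

theorem bfs_preserve_inactive (n m : Int) (g : List (List (Option Int))) (q : List (Int × Int))
    (a b : Int) (h : pvIsActive (pvCellAt g a b) = false) :
    pvIsActive (pvCellAt (bfsA n m g q).2 a b) = false := by
  cases hv : pvIsActive (pvCellAt (bfsA n m g q).2 a b)
  · rfl
  · rw [bfs_shrink n m g q a b hv] at h; exact h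

-- every cell of the worklist ends up inactive
theorem bfs_mem_inactive (n m : Int) : ∀ (g : List (List (Option Int))) (q : List (Int × Int)),
    ∀ p ∈ q, pvIsActive (pvCellAt (bfsA n m g q).2 p.1 p.2) = false := by
  intro g q
  fun_induction bfsA n m g q with
  | case1 => intro p hp; simp at hp
  | case2 g r c rest hx out ih =>
    intro p hp
    rcases List.mem_cons.mp hp with he | hm
    · subst he
      simp only []
      apply bfs_preserve_inactive
      rw [pvCellAt_mark_self]
      rfl
    · exact ih p (List.mem_append_left _ hm)
  | case3 g r c rest hx ih =>
    intro p hp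
    rcases List.mem_cons.mp hp with he | hm
    · subst he
      apply bfs_preserve_inactive
      simpa using hx
    · exact ih p hm

-- bfs is invariant under permutation of the worklist
theorem bfs_perm (n m : Int) : ∀ (k : Nat) (q1 q2 : List (Int × Int)), q1.Perm q2 →
    ∀ g, pvActive g ≤ k → bfsA n m g q1 = bfsA n m g q2 := by
  intro k
  induction k using Nat.strong_induction_on with
  | _ k IH =>
    intro q1 q2 hp
    induction hp with
    | nil => intro g hg; rfl
    | cons x hsub ih =>
      intro g hg
      obtain ⟨r, c⟩ := x
      cases hx : pvIsActive (pvCellAt g r c) with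
      | true =>
        rw [bfsA_cons_active n m hx, bfsA_cons_active n m hx]
        rw [IH (pvActive (pvMark g r c)) (lt_of_lt_of_le (pvActive_mark_lt g r c hx) hg)
          _ _ (hsub.append_right (pvNbrs n m r c)) (pvMark g r c) le_rfl]
      | false =>
        rw [bfsA_cons_inactive n m hx, bfsA_cons_inactive n m hx]
        exact ih g hg
    | swap x y l =>
      intro g hg
      obtain ⟨rx, cx⟩ := x
      obtain ⟨ry, cy⟩ := y
      cases hy : pvIsActive (pvCellAt g ry cy) with
      | false =>
        cases hx : pvIsActive (pvCellAt g rx cx) with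
        | false =>
          rw [bfsA_cons_inactive n m hy, bfsA_cons_inactive n m hx,
            bfsA_cons_inactive n m hx, bfsA_cons_inactive n m hy]
        | true =>
          rw [bfsA_cons_inactive n m hy, bfsA_cons_active n m hx, bfsA_cons_active n m hx]
          have hy' : pvIsActive (pvCellAt (pvMark g rx cx) ry cy) = false := by
            cases hv : pvIsActive (pvCellAt (pvMark g rx cx) ry cy)
            · rfl
            · rw [pvActive_of_mark g rx cx ry cy hv] at hy; exact hy
          rw [List.cons_append, bfsA_cons_inactive n m hy']
      | true =>
        cases hx : pvIsActive (pvCellAt g rx cx) with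
        | false =>
          rw [bfsA_cons_inactive n m hx, bfsA_cons_active n m hy, bfsA_cons_active n m hy]
          have hx' : pvIsActive (pvCellAt (pvMark g ry cy) rx cx) = false := by
            cases hv : pvIsActive (pvCellAt (pvMark g ry cy) rx cx)
            · rfl
            · rw [pvActive_of_mark g ry cy rx cx hv] at hx; exact hx
          rw [List.cons_append, bfsA_cons_inactive n m hx']
        | true =>
          by_cases hd : ((rx, cx) : Int × Int) = (ry, cy)
          · have h1 : rx = ry := congrArg Prod.fst hd
            have h2 : cx = cy := congrArg Prod.snd hd
            rw [h1, h2]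
          · have hx1 : pvIsActive (pvCellAt (pvMark g ry cy) rx cx) = true := by
              rwa [pvCellAt_mark_ne g hd]
            have hy1 : pvIsActive (pvCellAt (pvMark g rx cx) ry cy) = true := by
              rwa [pvCellAt_mark_ne g (Ne.symm hd)]
            rw [bfsA_cons_active n m hy, List.cons_append, bfsA_cons_active n m hx1,
              bfsA_cons_active n m hx, List.cons_append, bfsA_cons_active n m hy1]
            have hgeq : pvMark (pvMark g ry cy) rx cx = pvMark (pvMark g rx cx) ry cy :=
              pvMark_comm g hy hx (Ne.symm hd)
            have hperm : (((l ++ pvNbrs n m ry cy) ++ pvNbrs n m rx cx)).Perm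
                ((l ++ pvNbrs n m rx cx) ++ pvNbrs n m ry cy) := by
              rw [List.append_assoc, List.append_assoc]
              exact List.Perm.append_left l List.perm_append_comm
            have hk : pvActive (pvMark (pvMark g ry cy) rx cx) < k :=
              lt_of_le_of_lt (pvActive_mark_le _ _ _)
                (lt_of_lt_of_le (pvActive_mark_lt g ry cy hy) hg)
            rw [IH _ hk _ _ hperm _ le_rfl, hgeq]
            rw [pvCellVal_mark_ne g (Ne.symm hd), pvCellVal_mark_ne g hd]
            refine Prod.ext ?_ rfl
            simp only []
            ring
    | trans h1 h2 ih1 ih2 =>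
      intro g hg
      exact (ih1 g hg).trans (ih2 g hg)

-- bfs over a concatenated worklist runs in two stages
theorem bfs_append (n m : Int) : ∀ (k : Nat) (g), pvActive g ≤ k → ∀ (xs ys : List (Int × Int)),
    bfsA n m g (xs ++ ys) =
      ((bfsA n m g xs).1 + (bfsA n m (bfsA n m g xs).2 ys).1,
        (bfsA n m (bfsA n m g xs).2 ys).2) := by
  intro k
  induction k using Nat.strong_induction_on with
  | _ k IH =>
    intro g hg xs
    induction xs with
    | nil => intro ys; simp [bfsA_nil]
    | cons x xs' ih =>
      intro ys
      obtain ⟨r, c⟩ := x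
      cases hx : pvIsActive (pvCellAt g r c) with
      | false =>
        rw [List.cons_append, bfsA_cons_inactive n m hx, bfsA_cons_inactive n m hx]
        exact ih ys
      | true =>
        rw [List.cons_append, bfsA_cons_active n m hx, bfsA_cons_active n m hx]
        have hlt : pvActive (pvMark g r c) < k := lt_of_lt_of_le (pvActive_mark_lt g r c hx) hg
        have hperm : ((xs' ++ ys) ++ pvNbrs n m r c).Perm ((xs' ++ pvNbrs n m r c) ++ ys) := by
          rw [List.append_assoc, List.append_assoc]
          exact List.Perm.append_left xs' List.perm_append_comm
        rw [bfs_perm n m (pvActive (pvMark g r c)) _ _ hperm _ le_rfl]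
        rw [IH (pvActive (pvMark g r c)) hlt _ le_rfl (xs' ++ pvNbrs n m r c) ys]
        refine Prod.ext ?_ rfl
        simp only []
        ring

-- dropping an inactive cell from the worklist changes nothing
theorem bfs_drop (n m : Int) (g : List (List (Option Int))) {r c : Int}
    (hp : pvIsActive (pvCellAt g r c) = false) (ws1 ws2 : List (Int × Int)) :
    bfsA n m g (ws1 ++ (r, c) :: ws2) = bfsA n m g (ws1 ++ ws2) := by
  rw [bfs_perm n m (pvActive g) _ _ List.perm_middle g le_rfl, bfsA_cons_inactive n m hp]

-- dropping a duplicated cell changes nothing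
theorem bfs_dup (n m : Int) (g : List (List (Option Int))) {p : Int × Int}
    (ws1 ws2 : List (Int × Int)) (hp : p ∈ ws1) :
    bfsA n m g (ws1 ++ p :: ws2) = bfsA n m g (ws1 ++ ws2) := by
  obtain ⟨a, b⟩ := p
  have h1 : (ws1 ++ (a, b) :: ws2).Perm ((ws1 ++ ws2) ++ [(a, b)]) :=
    List.perm_middle.trans (List.perm_append_singleton _ _).symm
  rw [bfs_perm n m (pvActive g) _ _ h1 g le_rfl]
  rw [bfs_append n m (pvActive g) g le_rfl (ws1 ++ ws2) [(a, b)]]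
  have hin : pvIsActive (pvCellAt (bfsA n m g (ws1 ++ ws2)).2 a b) = false :=
    bfs_mem_inactive n m g (ws1 ++ ws2) (a, b) (List.mem_append_left _ hp)
  rw [bfsA_cons_inactive n m hin, bfsA_nil]
  simp

-- values of unmarked cells survive a mark
theorem sumVals_mark (g : List (List (Option Int))) (r c : Int) (F : List (Int × Int))
    (h : ((r, c) : Int × Int) ∉ F) :
    pvSumVals (pvMark g r c) F = pvSumVals g F := by
  unfold pvSumVals
  congr 1
  apply List.map_congr_left
  intro p hp
  have hne : ((p.1, p.2) : Int × Int) ≠ (r, c) := by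
    intro he
    exact h (by simpa [← he] using hp)
  exact pvCellVal_mark_ne g hne

-- one synchronous round: pop a whole frontier of distinct active cells
theorem bfs_step (n m : Int) : ∀ (F : List (Int × Int)) (g), F.Nodup →
    (∀ p ∈ F, pvIsActive (pvCellAt g p.1 p.2) = true) →
    bfsA n m g F =
      (pvSumVals g F + (bfsA n m (pvMarkAll g F) (F.flatMap (fun p => pvNbrs n m p.1 p.2))).1,
        (bfsA n m (pvMarkAll g F) (F.flatMap (fun p => pvNbrs n m p.1 p.2))).2) := by
  intro F
  induction F with
  | nil => intro g _ _; simp [bfsA_nil, pvSumVals, pvMarkAll]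
  | cons p F ih =>
    intro g hnd hact
    obtain ⟨r, c⟩ := p
    have hp : pvIsActive (pvCellAt g r c) = true := hact _ (List.mem_cons_self ..)
    have hpn : ((r, c) : Int × Int) ∉ F := (List.nodup_cons.mp hnd).1
    have hndF : F.Nodup := (List.nodup_cons.mp hnd).2
    rw [bfsA_cons_active n m hp]
    rw [bfs_append n m (pvActive (pvMark g r c)) _ le_rfl F (pvNbrs n m r c)]
    have hactF : ∀ q ∈ F, pvIsActive (pvCellAt (pvMark g r c) q.1 q.2) = true := by
      intro q hq
      have hne : ((q.1, q.2) : Int × Int) ≠ (r, c) := by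
        intro he
        exact hpn (by simpa [← he] using hq)
      rw [pvCellAt_mark_ne g hne]
      exact hact q (List.mem_cons_of_mem _ hq)
    rw [ih (pvMark g r c) hndF hactF]
    have hma : pvMarkAll (pvMark g r c) F = pvMarkAll g ((r, c) :: F) := by
      simp [pvMarkAll]
    have hfm : (((r, c) :: F).flatMap (fun p => pvNbrs n m p.1 p.2)) =
        pvNbrs n m r c ++ F.flatMap (fun p => pvNbrs n m p.1 p.2) := by
      simp
    rw [hma, hfm]
    have hperm : (F.flatMap (fun p => pvNbrs n m p.1 p.2) ++ pvNbrs n m r c).Perm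
        (pvNbrs n m r c ++ F.flatMap (fun p => pvNbrs n m p.1 p.2)) := List.perm_append_comm
    rw [← bfs_perm n m (pvActive (pvMarkAll g ((r, c) :: F))) _ _ hperm _ le_rfl]
    rw [bfs_append n m (pvActive (pvMarkAll g ((r, c) :: F))) _ le_rfl
      (F.flatMap (fun p => pvNbrs n m p.1 p.2)) (pvNbrs n m r c)]
    rw [sumVals_mark g r c F hpn]
    have hsv : pvSumVals g ((r, c) :: F) = pvCellVal g r c + pvSumVals g F := by
      simp [pvSumVals]
    rw [hsv]
    refine Prod.ext ?_ rfl
    simp only []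
    ring

-- the dedup fold of Source B, flattened
def dfStep (g : List (List (Option Int))) (acc : List (Int × Int)) (q : Int × Int) :
    List (Int × Int) :=
  if pvIsActive (pvCellAt g q.1 q.2) = true ∧ q ∉ acc then acc ++ [q] else acc

theorem pvFoldl_flatMap {α β γ : Type} (l : List α) (f : α → List β) (step : γ → β → γ) :
    ∀ (init : γ), (l.flatMap f).foldl step init = l.foldl (fun acc x => (f x).foldl step acc) init := by
  induction l with
  | nil => intro init; rfl
  | cons a t ih => intro init; simp [List.flatMap_cons, List.foldl_append, ih]

theorem buildNext_eq (n m : Int) (g : List (List (Option Int))) (F : List (Int × Int)) :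
    pvBuildNext n m g F = (F.flatMap (fun p => pvNbrs n m p.1 p.2)).foldl (dfStep g) [] := by
  unfold pvBuildNext
  rw [pvFoldl_flatMap]
  have hin : ∀ (p : Int × Int) (acc : List (Int × Int)),
      ([(p.1+1,p.2),(p.1,p.2+1),(p.1-1,p.2),(p.1,p.2-1)].foldl (fun acc q =>
        if 0 ≤ q.1 ∧ q.1 < n ∧ 0 ≤ q.2 ∧ q.2 < m ∧ pvIsActive (pvCellAt g q.1 q.2) = true ∧ q ∉ acc
        then acc ++ [q] else acc) acc) = (pvNbrs n m p.1 p.2).foldl (dfStep g) acc := by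
    intro p acc
    unfold pvNbrs
    rw [List.foldl_filter]
    congr 1
    funext acc q
    unfold dfStep
    by_cases hb : 0 ≤ q.1 ∧ q.1 < n ∧ 0 ≤ q.2 ∧ q.2 < m
    · by_cases ha : pvIsActive (pvCellAt g q.1 q.2) = true ∧ q ∉ acc
      · rw [if_pos ⟨hb.1, hb.2.1, hb.2.2.1, hb.2.2.2, ha.1, ha.2⟩,
          if_pos (decide_eq_true hb), if_pos ha]
      · rw [if_neg (fun hcon => ha ⟨hcon.2.2.2.2.1, hcon.2.2.2.2.2⟩),
          if_pos (decide_eq_true hb), if_neg ha]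
    · rw [if_neg (by tauto), if_neg (by simpa using hb)]
  have : (fun acc p => [(p.1+1,p.2),(p.1,p.2+1),(p.1-1,p.2),(p.1,p.2-1)].foldl (fun acc q =>
        if 0 ≤ q.1 ∧ q.1 < n ∧ 0 ≤ q.2 ∧ q.2 < m ∧ pvIsActive (pvCellAt g q.1 q.2) = true ∧ q ∉ acc
        then acc ++ [q] else acc) acc)
      = (fun (acc : List (Int × Int)) (p : Int × Int) => (pvNbrs n m p.1 p.2).foldl (dfStep g) acc) := by
    funext acc p
    exact hin p acc
  rw [this]

theorem bfs_dedup (n m : Int) (g : List (List (Option Int))) :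
    ∀ (ws acc : List (Int × Int)),
    bfsA n m g (acc ++ ws) = bfsA n m g (ws.foldl (dfStep g) acc) := by
  intro ws
  induction ws with
  | nil => intro acc; simp
  | cons q ws ih =>
    intro acc
    obtain ⟨a, b⟩ := q
    rw [List.foldl_cons]
    by_cases hq : pvIsActive (pvCellAt g a b) = true ∧ ((a, b) : Int × Int) ∉ acc
    · have hstep : dfStep g acc (a, b) = acc ++ [(a, b)] := if_pos hq
      rw [hstep, ← ih (acc ++ [(a, b)])]
      simp
    · have hstep : dfStep g acc (a, b) = acc := if_neg hq
      rw [hstep, ← ih acc]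
      by_cases ha : pvIsActive (pvCellAt g a b) = true
      · have hmem : ((a, b) : Int × Int) ∈ acc := by tauto
        exact bfs_dup n m g acc ws hmem
      · exact bfs_drop n m g (by simpa using ha) acc ws

theorem dfFold_nodup (g : List (List (Option Int))) :
    ∀ (ws acc : List (Int × Int)), acc.Nodup → (ws.foldl (dfStep g) acc).Nodup := by
  intro ws
  induction ws with
  | nil => intro acc h; exact h
  | cons q ws ih =>
    intro acc h
    rw [List.foldl_cons]
    unfold dfStep
    split
    · rename_i hq
      refine ih _ ?_
      rw [List.nodup_append]
      refine ⟨h, by simp, ?_⟩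
      intro a ha' b hb'
      have hb2 : b = q := by simpa using hb'
      intro he
      subst hb2
      subst he
      exact hq.2 ha'
    · exact ih _ h

theorem dfFold_mem (g : List (List (Option Int))) :
    ∀ (ws acc : List (Int × Int)) (q : Int × Int), q ∈ ws.foldl (dfStep g) acc →
      q ∈ acc ∨ pvIsActive (pvCellAt g q.1 q.2) = true := by
  intro ws
  induction ws with
  | nil => intro acc q h; exact Or.inl h
  | cons x ws ih =>
    intro acc q h
    rw [List.foldl_cons] at h
    unfold dfStep at h
    by_cases hx : pvIsActive (pvCellAt g x.1 x.2) = true ∧ x ∉ acc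
    · rw [if_pos hx] at h
      rcases ih _ q h with hm | ha
      · rcases List.mem_append.mp hm with hm' | hm'
        · exact Or.inl hm'
        · right
          have : q = x := by simpa using hm'
          rw [this]
          exact hx.1
      · exact Or.inr ha
    · rw [if_neg hx] at h
      exact ih _ q h

theorem markAll_le (F : List (Int × Int)) : ∀ g, pvActive (pvMarkAll g F) ≤ pvActive g := by
  induction F with
  | nil => intro g; exact le_rfl
  | cons p F ih =>
    intro g
    have h1 : pvMarkAll g (p :: F) = pvMarkAll (pvMark g p.1 p.2) F := by simp [pvMarkAll]
    rw [h1]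
    exact le_trans (ih _) (pvActive_mark_le g p.1 p.2)

theorem markAll_lt (g : List (List (Option Int))) (r c : Int) (F : List (Int × Int))
    (h : pvIsActive (pvCellAt g r c) = true) :
    pvActive (pvMarkAll g ((r, c) :: F)) < pvActive g := by
  have h1 : pvMarkAll g ((r, c) :: F) = pvMarkAll (pvMark g r c) F := by simp [pvMarkAll]
  rw [h1]
  exact lt_of_le_of_lt (markAll_le F _) (pvActive_mark_lt g r c h)

-- Source B's frontier loop computes exactly A's BFS
theorem levels_eq_bfs (n m : Int) : ∀ (fuel : Nat) (g : List (List (Option Int)))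
    (F : List (Int × Int)), pvActive g < fuel → F.Nodup →
    (∀ p ∈ F, pvIsActive (pvCellAt g p.1 p.2) = true) →
    levelsB n m fuel g F = bfsA n m g F := by
  intro fuel
  induction fuel with
  | zero => intro g F h; omega
  | succ fuel ihf =>
    intro g F hf hnd hact
    cases F with
    | nil => simp [levelsB, bfsA_nil]
    | cons p F =>
      obtain ⟨r, c⟩ := p
      have hp : pvIsActive (pvCellAt g r c) = true := hact _ (List.mem_cons_self ..)
      rw [bfs_step n m ((r, c) :: F) g hnd hact]
      simp only [levelsB]
      have hbn : bfsA n m (pvMarkAll g ((r, c) :: F))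
            (((r, c) :: F).flatMap (fun p => pvNbrs n m p.1 p.2)) =
          bfsA n m (pvMarkAll g ((r, c) :: F)) (pvBuildNext n m (pvMarkAll g ((r, c) :: F)) ((r, c) :: F)) := by
        rw [buildNext_eq]
        exact bfs_dedup n m _ _ []
      have hlt : pvActive (pvMarkAll g ((r, c) :: F)) < fuel := by
        have := markAll_lt g r c F hp
        omega
      have hIH : levelsB n m fuel (pvMarkAll g ((r, c) :: F))
            (pvBuildNext n m (pvMarkAll g ((r, c) :: F)) ((r, c) :: F)) =
          bfsA n m (pvMarkAll g ((r, c) :: F))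
            (pvBuildNext n m (pvMarkAll g ((r, c) :: F)) ((r, c) :: F)) := by
        apply ihf _ _ hlt
        · rw [buildNext_eq]
          exact dfFold_nodup _ _ [] (by simp)
        · intro q hq
          rw [buildNext_eq] at hq
          rcases dfFold_mem _ _ [] q hq with hm | ha
          · simp at hm
          · exact ha
      rw [hIH, ← hbn]

-- per-cell equality of the two flood fills
theorem flood_eq_lake (n m : Int) (g : List (List (Option Int))) (r c : Int)
    (hr : 0 ≤ r) (hrn : r < n) (hc : 0 ≤ c) (hcm : c < m) :
    floodA n m g r c = lakeB n m g r c := by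
  unfold floodA lakeB
  rw [if_neg (by omega)]
  by_cases hw : pvCellAt g r c = some 0 ∨ pvCellAt g r c = none
  · rw [if_pos hw, if_pos hw]
  · rw [if_neg hw, if_neg hw]
    have ha : pvIsActive (pvCellAt g r c) = true := by
      cases hv : pvIsActive (pvCellAt g r c)
      · exact absurd ((pvIsActive_false_iff _).mp hv) hw
      · rfl
    refine (levels_eq_bfs n m (pvActive g + 1) g [(r, c)] (by omega) (by simp) ?_).symm
    intro p hp
    have : p = (r, c) := by simpa using hp
    rw [this]
    exact ha

theorem pv_max_eq (a b : Int) : (if a < b then b else a) = max a b := by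
  rcases lt_or_ge a b with h | h
  · simp [h, max_eq_right h.le]
  · simp [not_lt.mpr h, max_eq_left h]

theorem pv_main (n m : Int) (grid : List (List Int)) :
    largestLake n m grid = largestLake_alt n m grid := by
  unfold largestLake largestLake_alt
  congr 1
  apply PySem.List.foldl_congr_mem
  intro st i hi
  apply PySem.List.foldl_congr_mem
  intro st' j hj
  rw [PySem.List.mem_pyRange_one] at hi hj
  by_cases hcell : pvCellAt st'.2 i j ≠ some 0
  · simp only [if_pos hcell]
    rw [flood_eq_lake n m st'.2 i j hi.1 hi.2 hj.1 hj.2, pv_max_eq]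
  · simp only [if_neg hcell]

-- ===== VERDICT (by name: the statement is the Claim_ definition above) =====
theorem largestLake_spec : Claim_equal_largestLake := by
  intro n m grid _ _
  unfold Spec_largestLake
  exact pv_main n m grid
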